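-- pv_equiv track=rewrite | github.com/swjw13/baekjoon | programmers/kakao/17681.py | solution
-- ===== SOURCE A (Python) =====
-- def solution(n, arr1, arr2):
--     answer = []
--     for i in range(n):
--         tmp = arr1[i] | arr2[i]
--         line = ""
--         for i in range(n):
--             if tmp & 1 == 1:
--                 line = "#" + line
--             else:
--                 line = " " + line
--             tmp = tmp >> 1
--
--         answer.append(line)
--     return answer
-- ===== SOURCE B (Python) =====
-- def solution(n, arr1, arr2):
--     # Column-major construction: instead of finishing one row at a time, all n
--     # rows grow together, one character per bit position (most significant first).
--     vals = [arr1[i] | arr2[i] for i in range(n)]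
--     rows = [[] for _ in range(n)]
--     for k in range(n - 1, -1, -1):
--         for r, v in zip(rows, vals):
--             r.append('#' if v >> k & 1 else ' ')
--     return [''.join(r) for r in rows]
-- ===== Notes on version B (the rewrite author's own statement) =====
-- stated objective: alternative
-- what changed: A builds each row independently with a stateful LSB-first shift-and-prepend loop; B transposes the traversal: it precomputes the OR'd row values once, then grows all n rows simultaneously column by column (one bit position per pass, MSB first), joining each row at the end.
import Mathlib
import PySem

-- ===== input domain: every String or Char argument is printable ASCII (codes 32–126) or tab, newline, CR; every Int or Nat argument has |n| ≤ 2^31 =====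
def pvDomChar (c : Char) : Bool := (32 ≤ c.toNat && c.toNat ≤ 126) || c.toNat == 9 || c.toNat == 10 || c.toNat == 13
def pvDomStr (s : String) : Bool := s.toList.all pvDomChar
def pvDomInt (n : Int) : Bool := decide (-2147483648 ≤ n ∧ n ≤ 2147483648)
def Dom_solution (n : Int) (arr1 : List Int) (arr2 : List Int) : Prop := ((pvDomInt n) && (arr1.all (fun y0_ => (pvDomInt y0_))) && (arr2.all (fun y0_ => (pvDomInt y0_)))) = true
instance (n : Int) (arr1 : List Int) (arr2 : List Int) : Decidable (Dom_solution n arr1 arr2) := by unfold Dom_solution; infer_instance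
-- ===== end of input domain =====

-- B replaces A's row-at-a-time shift-and-prepend construction by a column-major one:
-- the OR'd row values are computed once, then all rows grow together, one character
-- per bit position (MSB first); equal return values on Pre_.

-- ===== PORT A =====
def solution (n : Int) (arr1 : List Int) (arr2 : List Int) : List String :=
  (PySem.List.pyRange 0 n 1).foldl (fun answer i =>
    let tmp := PySem.Int.bor (PySem.List.pyGetD arr1 i 0) (PySem.List.pyGetD arr2 i 0)
    let r := (PySem.List.pyRange 0 n 1).foldl
      (fun (st : List Char × Int) _ =>
        (if PySem.Int.band st.2 1 = 1 then '#' :: st.1 else ' ' :: st.1, st.2 >>> (1 : Nat)))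
      (([] : List Char), tmp)
    answer ++ [String.mk r.1]) []

-- ===== PORT B =====
-- `[[] for _ in range(n)]` is List.replicate n.toNat []; the mutating inner
-- `for r, v in zip(rows, vals): r.append(c)` is the map over rows.zip vals;
-- `v >> k` is `>>> k.toNat`, exact since range(n-1,-1,-1) yields only k ≥ 0.
def solution_alt (n : Int) (arr1 : List Int) (arr2 : List Int) : List String :=
  let vals := (PySem.List.pyRange 0 n 1).map
    (fun i => PySem.Int.bor (PySem.List.pyGetD arr1 i 0) (PySem.List.pyGetD arr2 i 0))
  let rows := (PySem.List.pyRange (n - 1) (-1) (-1)).foldl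
    (fun rows k => (rows.zip vals).map
      (fun (rv : List Char × Int) =>
        rv.1 ++ [if PySem.Int.band (rv.2 >>> k.toNat) 1 ≠ 0 then '#' else ' ']))
    (List.replicate n.toNat ([] : List Char))
  rows.map String.mk

-- ===== PRECONDITION & SPEC =====
-- Pre_: exactly the inputs where Python A does not raise IndexError (arr1[i], arr2[i] for i in range(n)).
def Pre_solution (n : Int) (arr1 : List Int) (arr2 : List Int) : Prop :=
  n ≤ (arr1.length : Int) ∧ n ≤ (arr2.length : Int)
instance (n : Int) (arr1 : List Int) (arr2 : List Int) : Decidable (Pre_solution n arr1 arr2) := by unfold Pre_solution; infer_instance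

def pvWitness_solution : Int × List Int × List Int := (3, [9, 20, 28], [30, 1, 3])

def Spec_solution (n : Int) (arr1 : List Int) (arr2 : List Int) (out : List String) : Prop := out = solution_alt n arr1 arr2
instance (n : Int) (arr1 : List Int) (arr2 : List Int) (out : List String) : Decidable (Spec_solution n arr1 arr2 out) := by unfold Spec_solution; infer_instance

-- ===== CLAIM (what is proved, stated in full; the proofs are below) =====
def Claim_equal_solution : Prop := ∀ (n : Int) (arr1 : List Int) (arr2 : List Int), Dom_solution n arr1 arr2 → Pre_solution n arr1 arr2 → Spec_solution n arr1 arr2 (solution n arr1 arr2)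

-- ===== LEMMAS AND PROOFS =====

-- character for bit k of v, and the n low bits of v rendered MSB-first
def pvChar (v : Int) (k : Nat) : Char :=
  if PySem.Int.band (v >>> k) 1 = 1 then '#' else ' '

def pvBits : Nat → Int → List Char
  | 0, _ => []
  | m + 1, v => pvChar v m :: pvBits m v

theorem pvShift_succ (tmp : Int) (k : Nat) : tmp >>> (k + 1) = (tmp >>> (1 : Nat)) >>> k := by
  have h : ((2 ^ (k + 1) : Nat) : Int) = 2 * ((2 ^ k : Nat) : Int) := by push_cast [pow_succ]; ring
  rw [Int.shiftRight_eq_div_pow, Int.shiftRight_eq_div_pow, Int.shiftRight_eq_div_pow, h,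
    ← Int.ediv_ediv_eq_ediv_mul (show (0 : Int) ≤ 2 by norm_num)]
  norm_num

theorem pvCharNe (x : Int) :
    (if PySem.Int.band x 1 ≠ 0 then '#' else ' ') = (if PySem.Int.band x 1 = 1 then '#' else ' ') := by
  rw [PySem.Int.band_one]
  rcases PySem.Int.mod_two_eq x with h | h <;> rw [h] <;> simp

theorem pvBits_shift (m : Nat) : ∀ (v : Int),
    pvBits (m + 1) v = pvBits m (v >>> (1 : Nat)) ++ [pvChar v 0] := by
  induction m with
  | zero => intro v; simp [pvBits]
  | succ m ih =>
      intro v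
      have hh : pvChar v (m + 1) = pvChar (v >>> (1 : Nat)) m := by
        unfold pvChar; rw [pvShift_succ]
      show pvChar v (m + 1) :: pvBits (m + 1) v
          = (pvChar (v >>> (1 : Nat)) m :: pvBits m (v >>> (1 : Nat))) ++ [pvChar v 0]
      rw [hh, ih v, List.cons_append]

-- A's inner loop produces exactly the MSB-first bit characters
theorem pvRowA (l : List Int) : ∀ (tmp : Int) (line : List Char),
    (l.foldl
      (fun (st : List Char × Int) _ =>
        (if PySem.Int.band st.2 1 = 1 then '#' :: st.1 else ' ' :: st.1, st.2 >>> (1 : Nat)))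
      (line, tmp)).1 = pvBits l.length tmp ++ line := by
  induction l with
  | nil => intro tmp line; simp [pvBits]
  | cons x xs ih =>
      intro tmp line
      simp only [List.foldl_cons, List.length_cons]
      rw [ih]
      have h1 : (if PySem.Int.band tmp 1 = 1 then '#' :: line else ' ' :: line)
          = pvChar tmp 0 :: line := by
        unfold pvChar; simp only [Int.shiftRight_zero]; split <;> rfl
      rw [h1, pvBits_shift]
      simp [List.append_assoc]

-- zipping a mapped zip back with the same second list keeps the pairs aligned
theorem pvZipMap {α β γ : Type} : ∀ (rows : List α) (vals : List β) (g : α × β → γ),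
    rows.length = vals.length →
    ((rows.zip vals).map g).zip vals = (rows.zip vals).map (fun rv => (g rv, rv.2)) := by
  intro rows
  induction rows with
  | nil => intro vals g h; simp
  | cons r rows ih =>
      intro vals g h
      cases vals with
      | nil => simp at h
      | cons v vs =>
          simp only [List.zip_cons_cons, List.map_cons]
          rw [ih vs g (by simpa using h)]

-- B's column-major fold: every row ends up with one character per processed bit position
theorem pvZ (vals : List Int) : ∀ (ks : List Int) (rows : List (List Char)),
    rows.length = vals.length →
    ks.foldl
      (fun rows k => (rows.zip vals).map
        (fun (rv : List Char × Int) =>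
          rv.1 ++ [if PySem.Int.band (rv.2 >>> k.toNat) 1 ≠ 0 then '#' else ' ']))
      rows
    = (rows.zip vals).map
        (fun rv => rv.1 ++ ks.map (fun k => if PySem.Int.band (rv.2 >>> k.toNat) 1 ≠ 0 then '#' else ' ')) := by
  intro ks
  induction ks with
  | nil =>
      intro rows h
      simp only [List.foldl_nil, List.map_nil, List.append_nil]
      exact (List.map_fst_zip (le_of_eq h)).symm
  | cons k ks ih =>
      intro rows h
      rw [List.foldl_cons, ih _ (by simp [h])]
      rw [pvZipMap rows vals _ h, List.map_map]
      simp [Function.comp, List.append_assoc]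

theorem pvZipRep {α β : Type} (l : List β) (a : α) :
    (List.replicate l.length a).zip l = l.map (fun b => (a, b)) := by
  induction l with
  | nil => simp
  | cons x xs ih => simp [List.replicate_succ, ih]

theorem pvRange_bits (m : Nat) (v : Int) :
    (List.range m).map
      (fun k => if PySem.Int.band (v >>> ((m : Int) - 1 - (k : Nat)).toNat) 1 ≠ 0 then '#' else ' ')
    = pvBits m v := by
  induction m with
  | zero => simp [pvBits]
  | succ m ih =>
      rw [List.range_succ_eq_map, List.map_cons, List.map_map]
      simp only [pvBits]
      congr 1
      · have hhead : (((m + 1 : Nat) : Int) - 1 - ((0 : Nat) : Int)).toNat = m := by push_cast; omega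
        show (if PySem.Int.band (v >>> (((m + 1 : Nat) : Int) - 1 - ((0 : Nat) : Int)).toNat) 1 ≠ 0 then '#' else ' ') = pvChar v m
        rw [hhead, pvCharNe]; rfl
      · rw [← ih]
        apply List.map_congr_left
        intro k _
        have h2 : (((m + 1 : Nat) : Int) - 1 - ((k + 1 : Nat) : Int)).toNat
            = ((m : Int) - 1 - (k : Nat)).toNat := by push_cast; omega
        show (if PySem.Int.band (v >>> (((m + 1 : Nat) : Int) - 1 - ((k + 1 : Nat) : Int)).toNat) 1 ≠ 0 then '#' else ' ') = _
        rw [h2]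

-- B's per-row bit characters over range(n-1,-1,-1) are the MSB-first bits
theorem pvRowB (n v : Int) :
    (PySem.List.pyRange (n - 1) (-1) (-1)).map
      (fun (k : Int) => if PySem.Int.band (v >>> k.toNat) 1 ≠ 0 then '#' else ' ')
    = pvBits n.toNat v := by
  rw [PySem.List.pyRange_neg_one, List.map_map]
  have hm : ((n - 1) - (-1)).toNat = n.toNat := by omega
  rw [hm]
  by_cases hn : 0 ≤ n
  · obtain ⟨m, rfl⟩ : ∃ m : Nat, n = (m : Int) := ⟨n.toNat, by omega⟩
    simp only [Int.toNat_natCast]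
    rw [← pvRange_bits m v]
    apply List.map_congr_left
    intro k _
    simp only [Function.comp]
  · have h0 : n.toNat = 0 := by omega
    rw [h0]; simp [pvBits]

-- both ports in the same canonical map form
theorem pvSolA_eq (n : Int) (arr1 arr2 : List Int) :
    solution n arr1 arr2
    = (PySem.List.pyRange 0 n 1).map (fun i =>
        String.mk (pvBits n.toNat
          (PySem.Int.bor (PySem.List.pyGetD arr1 i 0) (PySem.List.pyGetD arr2 i 0)))) := by
  unfold solution
  rw [PySem.List.foldl_append_singleton_eq_map, List.nil_append]
  apply List.map_congr_left
  intro i _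
  congr 1
  rw [pvRowA, List.append_nil, PySem.List.length_pyRange_one]
  simp

theorem pvSolB_eq (n : Int) (arr1 arr2 : List Int) :
    solution_alt n arr1 arr2
    = (PySem.List.pyRange 0 n 1).map (fun i =>
        String.mk (pvBits n.toNat
          (PySem.Int.bor (PySem.List.pyGetD arr1 i 0) (PySem.List.pyGetD arr2 i 0)))) := by
  show ((PySem.List.pyRange (n - 1) (-1) (-1)).foldl
      (fun rows k => (rows.zip ((PySem.List.pyRange 0 n 1).map
          (fun i => PySem.Int.bor (PySem.List.pyGetD arr1 i 0) (PySem.List.pyGetD arr2 i 0)))).map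
        (fun (rv : List Char × Int) =>
          rv.1 ++ [if PySem.Int.band (rv.2 >>> k.toNat) 1 ≠ 0 then '#' else ' ']))
      (List.replicate n.toNat ([] : List Char))).map String.mk = _
  set vals := (PySem.List.pyRange 0 n 1).map
      (fun i => PySem.Int.bor (PySem.List.pyGetD arr1 i 0) (PySem.List.pyGetD arr2 i 0)) with hv
  have hl : n.toNat = vals.length := by
    simp [hv, PySem.List.length_pyRange_one]
  rw [pvZ vals _ _ (by rw [List.length_replicate, hl])]
  rw [show List.replicate n.toNat ([] : List Char) = List.replicate vals.length [] from by rw [hl]]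
  rw [pvZipRep vals ([] : List Char), List.map_map, List.map_map, hv, List.map_map]
  apply List.map_congr_left
  intro i _
  simp only [Function.comp, List.nil_append]
  rw [pvRowB]

-- ===== VERDICT (by name: the statement is the Claim_ definition above) =====
theorem solution_spec : Claim_equal_solution := by
  intro n arr1 arr2 _ _
  unfold Spec_solution
  rw [pvSolA_eq, pvSolB_eq]
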